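-- pv_equiv track=rewrite | github.com/Walfred-MA/PAAT | scripts/reorderbytree.py | intencode
-- ===== SOURCE A (Python) =====
-- def intencode(value):
--
-- 	code = ""
--
-- 	code = chr( ord('0') + (value % 64) ) + code
-- 	value = value//64
--
-- 	while value:
--
-- 		code = chr( ord('0') + (value % 64) ) + code
-- 		value = value//64
--
-- 	return code
-- ===== SOURCE B (Python) =====
-- def intencode(value):
--     if value < 64:
--         return chr(ord('0') + value)
--     return intencode(value // 64) + chr(ord('0') + value % 64)
-- ===== Notes on version B (the rewrite author's own statement) =====
-- stated objective: simpler
-- what changed: Replaces the unrolled-first-digit while loop that prepends characters to an accumulator string with a direct recursion that emits the most-significant digits via the recursive call and appends the last digit, with no accumulator and no duplicated digit-emission code.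
import Mathlib
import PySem

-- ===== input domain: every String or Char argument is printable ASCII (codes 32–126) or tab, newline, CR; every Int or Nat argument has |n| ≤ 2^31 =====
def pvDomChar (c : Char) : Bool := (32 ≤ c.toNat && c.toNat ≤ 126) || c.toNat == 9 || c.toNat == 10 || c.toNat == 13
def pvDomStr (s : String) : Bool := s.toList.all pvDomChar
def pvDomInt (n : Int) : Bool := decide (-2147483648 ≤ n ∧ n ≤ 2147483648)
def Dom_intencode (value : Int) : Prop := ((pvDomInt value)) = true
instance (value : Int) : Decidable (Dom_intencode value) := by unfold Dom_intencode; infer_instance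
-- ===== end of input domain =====

-- B replaces A's accumulator while-loop (which duplicates the digit-emission line and prepends
-- to a string) by a direct recursion emitting high digits first; same value on all value ≥ 0.

-- chr(ord('0') + d) as a one-character string (exact for the digit values 0..63 reached under Pre_)
def pvDigit (d : Int) : String := String.ofList [Char.ofNat (48 + d).toNat]

-- ===== PORT A =====
-- the 'while value:' loop; under Pre_ (0 ≤ value) the Python guard 'value ≠ 0' equals 'value > 0',
-- which is the form used here to make the recursion total (A loops forever on negative input)
def intencodeLoop (value : Int) (code : String) : String :=
  if _h : value > 0 then
    intencodeLoop (PySem.Int.floordiv value 64) (pvDigit (PySem.Int.mod value 64) ++ code)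
  else code
termination_by value.toNat
decreasing_by
  rw [PySem.Int.floordiv_eq_ediv_of_pos (by norm_num : (0:Int) < 64)]
  omega

def intencode (value : Int) : String :=
  intencodeLoop (PySem.Int.floordiv value 64) (pvDigit (PySem.Int.mod value 64))

-- ===== PORT B =====
def intencode_alt (value : Int) : String :=
  if _h : value < 64 then pvDigit value
  else intencode_alt (PySem.Int.floordiv value 64) ++ pvDigit (PySem.Int.mod value 64)
termination_by value.toNat
decreasing_by
  rw [PySem.Int.floordiv_eq_ediv_of_pos (by norm_num : (0:Int) < 64)]
  omega

-- ===== PRECONDITION & SPEC =====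
-- Pre_ excludes negative inputs: there A's while-loop never terminates (value//64 stays -1), so A
-- returns on exactly the inputs Pre_ admits.
def Pre_intencode (value : Int) : Prop := 0 ≤ value
instance (value : Int) : Decidable (Pre_intencode value) := by unfold Pre_intencode; infer_instance

def pvWitness_intencode : Int := (130)

def Spec_intencode (value : Int) (out : String) : Prop := out = intencode_alt value
instance (value : Int) (out : String) : Decidable (Spec_intencode value out) := by unfold Spec_intencode; infer_instance

-- ===== CLAIM (what is proved, stated in full; the proofs are below) =====
def Claim_equal_intencode : Prop := ∀ (value : Int), Dom_intencode value → Pre_intencode value → Spec_intencode value (intencode value)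

-- ===== LEMMAS AND PROOFS =====

lemma pv_loop_append (n : Nat) : ∀ v : Int, v.toNat ≤ n → ∀ code tail : String,
    intencodeLoop v (code ++ tail) = intencodeLoop v code ++ tail := by
  induction n with
  | zero =>
    intro v hv code tail
    have h : ¬ v > 0 := by omega
    conv_lhs => rw [intencodeLoop]
    conv_rhs => rw [intencodeLoop]
    rw [dif_neg h, dif_neg h]
  | succ n ih =>
    intro v hv code tail
    by_cases h : v > 0
    · conv_lhs => rw [intencodeLoop]
      conv_rhs => rw [intencodeLoop]
      rw [dif_pos h, dif_pos h, ← String.append_assoc]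
      apply ih
      rw [PySem.Int.floordiv_eq_ediv_of_pos (by norm_num : (0:Int) < 64)]
      omega
    · conv_lhs => rw [intencodeLoop]
      conv_rhs => rw [intencodeLoop]
      rw [dif_neg h, dif_neg h]

lemma pv_main (n : Nat) : ∀ v : Int, v.toNat ≤ n → 0 ≤ v →
    intencodeLoop (PySem.Int.floordiv v 64) (pvDigit (PySem.Int.mod v 64)) = intencode_alt v := by
  induction n with
  | zero =>
    intro v hv h0
    have hv0 : v = 0 := by omega
    subst hv0
    rw [show PySem.Int.floordiv 0 64 = 0 by
          rw [PySem.Int.floordiv_eq_ediv_of_pos (by norm_num : (0:Int) < 64)]; norm_num,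
        show PySem.Int.mod 0 64 = 0 by
          rw [PySem.Int.mod_eq_emod_of_pos (by norm_num : (0:Int) < 64)]; norm_num]
    conv_lhs => rw [intencodeLoop]
    conv_rhs => rw [intencode_alt]
    rw [dif_neg (by norm_num : ¬ (0:Int) > 0), dif_pos (by norm_num : (0:Int) < 64)]
  | succ n ih =>
    intro v hv h0
    rw [PySem.Int.floordiv_eq_ediv_of_pos (by norm_num : (0:Int) < 64),
        PySem.Int.mod_eq_emod_of_pos (by norm_num : (0:Int) < 64)]
    by_cases h : v < 64
    · have hdiv : v / 64 = 0 := by omega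
      have hmod : v % 64 = v := by omega
      rw [hdiv, hmod]
      conv_lhs => rw [intencodeLoop]
      conv_rhs => rw [intencode_alt]
      rw [dif_neg (by norm_num : ¬ (0:Int) > 0), dif_pos h]
    · have hw : 0 < v / 64 := by omega
      conv_lhs => rw [intencodeLoop]
      rw [dif_pos hw]
      rw [pv_loop_append (PySem.Int.floordiv (v / 64) 64).toNat
            (PySem.Int.floordiv (v / 64) 64) (le_refl _)]
      have hih := ih (v / 64) (by
          have : v / 64 < v := by omega
          omega) (by omega)
      rw [hih]
      conv_rhs => rw [intencode_alt]
      rw [dif_neg h,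
          PySem.Int.floordiv_eq_ediv_of_pos (by norm_num : (0:Int) < 64),
          PySem.Int.mod_eq_emod_of_pos (by norm_num : (0:Int) < 64)]

-- ===== VERDICT (by name: the statement is the Claim_ definition above) =====
theorem intencode_spec : Claim_equal_intencode := by
  intro value _ hpre
  unfold Spec_intencode intencode
  exact pv_main value.toNat value (le_refl _) hpre
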